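-- pv_equiv track=rewrite | github.com/brkdnmz/inzvaland | Algorithm Program/22-23/spring/qual/its-our-birthday/sol.py | solve
-- ===== SOURCE A (Python) =====
-- from collections import defaultdict
-- from math import gcd
--
-- MOD = 10**9 + 7
--
-- def solve(n, a):
--     dp = defaultdict(int)
--     dp[(0, 1)] = 1
--     for x in a:
--         ndp = dp.copy()
--         for (p, q) in dp:
--             # p/q + 1/x
--             pp = p * x + q
--             qq = q * x
--             if pp > qq:
--                 continue
--             g = gcd(pp, qq)
--             pp //= g
--             qq //= g
--             ndp[(pp, qq)] += dp[(p, q)]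
--             ndp[(pp, qq)] %= MOD
--         dp = ndp
--     return dp[(1, 1)]
-- ===== SOURCE B (Python) =====
-- from math import gcd
--
-- MOD = 10**9 + 7
--
-- def solve(n, a):
--     # Top-down memoized recursion over the item index (state = reduced fraction p/q),
--     # instead of A's forward iterative dict DP.
--     memo = {}
--
--     def f(i, p, q):
--         if i == len(a):
--             return 1 if (p, q) == (1, 1) else 0
--         key = (i, p, q)
--         if key in memo:
--             return memo[key]
--         x = a[i]
--         res = f(i + 1, p, q)
--         pp = p * x + q
--         qq = q * x
--         if pp <= qq:
--             g = gcd(pp, qq)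
--             res = (res + f(i + 1, pp // g, qq // g)) % MOD
--         memo[key] = res
--         return res
--
--     return f(0, 0, 1)
-- ===== Notes on version B (the rewrite author's own statement) =====
-- stated objective: alternative
-- what changed: Replaces A's forward iterative DP (a dict of reduced-fraction states rebuilt per item) by a top-down recursion f(i, p, q) over the item index, memoized on (i, p, q), returning the number of subsets of a[i:] that carry p/q to exactly 1.
import Mathlib
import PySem

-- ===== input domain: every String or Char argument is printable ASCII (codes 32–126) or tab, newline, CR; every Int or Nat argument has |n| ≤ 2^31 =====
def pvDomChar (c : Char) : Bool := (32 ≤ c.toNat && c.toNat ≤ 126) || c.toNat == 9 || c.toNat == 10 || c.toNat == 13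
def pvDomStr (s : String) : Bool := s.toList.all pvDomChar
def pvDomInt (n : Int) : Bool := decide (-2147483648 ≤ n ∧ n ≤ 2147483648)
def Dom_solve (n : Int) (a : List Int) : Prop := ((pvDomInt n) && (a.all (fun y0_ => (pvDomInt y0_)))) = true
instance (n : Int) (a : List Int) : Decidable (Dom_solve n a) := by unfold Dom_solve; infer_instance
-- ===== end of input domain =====

-- B replaces A's forward iterative dict-DP over reduced-fraction states by a top-down
-- memoized recursion over the item index (objective: alternative decomposition).

-- ===== PORT A =====
def pvMOD : Int := 1000000007

-- the body of A's inner `for (p, q) in dp` loop (ndp is the accumulator, k the iterated key)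
def stepBody (d : PySem.Dict (Int × Int) Int) (x : Int)
    (ndp : PySem.Dict (Int × Int) Int) (k : Int × Int) : PySem.Dict (Int × Int) Int :=
  let p := k.1
  let q := k.2
  let pp := p * x + q
  let qq := q * x
  if pp > qq then ndp
  else
    let g : Int := Int.gcd pp qq
    let pp := PySem.Int.floordiv pp g
    let qq := PySem.Int.floordiv qq g
    let ndp := ndp.modify (pp, qq) 0 (fun w => w + d.getD (p, q) 0)
    ndp.modify (pp, qq) 0 (fun w => PySem.Int.mod w pvMOD)

-- one iteration of A's outer `for x in a` loop: ndp = dp.copy(); for (p, q) in dp: ...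
def solveStep (d : PySem.Dict (Int × Int) Int) (x : Int) : PySem.Dict (Int × Int) Int :=
  d.keys.foldl (stepBody d x) d

def solve (n : Int) (a : List Int) : Int :=
  (a.foldl solveStep ((PySem.Dict.empty).insert ((0 : Int), (1 : Int)) 1)).getD (1, 1) 0

-- ===== PORT B =====
-- f(i, p, q) of Source B: memo-threaded recursion on the suffix l = a[i:] (i kept for the memo key)
def solveAltMemo : List Int → Int → Int → Int → PySem.Dict (Int × Int × Int) Int →
    Int × PySem.Dict (Int × Int × Int) Int
  | [], _, p, q, m => (if p = 1 ∧ q = 1 then 1 else 0, m)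
  | x :: rest, i, p, q, m =>
    match m.get? (i, p, q) with
    | some v => (v, m)
    | none =>
      let s1 := solveAltMemo rest (i + 1) p q m
      let pp := p * x + q
      let qq := q * x
      if pp ≤ qq then
        let g : Int := Int.gcd pp qq
        let s2 := solveAltMemo rest (i + 1) (PySem.Int.floordiv pp g) (PySem.Int.floordiv qq g) s1.2
        let res := PySem.Int.mod (s1.1 + s2.1) pvMOD
        (res, s2.2.insert (i, p, q) res)
      else
        (s1.1, s1.2.insert (i, p, q) s1.1)

def solve_alt (n : Int) (a : List Int) : Int :=
  (solveAltMemo a 0 0 1 PySem.Dict.empty).1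

-- ===== PRECONDITION & SPEC =====
def Spec_solve (n : Int) (a : List Int) (out : Int) : Prop := out = solve_alt n a
instance (n : Int) (a : List Int) (out : Int) : Decidable (Spec_solve n a out) := by unfold Spec_solve; infer_instance

-- ===== CLAIM (what is proved, stated in full; the proofs are below) =====
def Claim_equal_solve : Prop := ∀ (n : Int) (a : List Int), Dom_solve n a → Spec_solve n a (solve n a)

-- ===== LEMMAS AND PROOFS =====

-- the memo-free value of B's recursion: number of subsets of the suffix leading p/q to 1/1
def fpure : List Int → Int → Int → Int
  | [], p, q => if p = 1 ∧ q = 1 then 1 else 0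
  | x :: rest, p, q =>
    let r1 := fpure rest p q
    let pp := p * x + q
    let qq := q * x
    if pp ≤ qq then
      let g : Int := Int.gcd pp qq
      PySem.Int.mod (r1 + fpure rest (PySem.Int.floordiv pp g) (PySem.Int.floordiv qq g)) pvMOD
    else r1

def pvSum (r : List Int) (l : List ((Int × Int) × Int)) : Int :=
  (l.map (fun kv => kv.2 * fpure r kv.1.1 kv.1.2)).sum

def Tsum (r : List Int) (d : PySem.Dict (Int × Int) Int) : Int := pvSum r d.items

def ValsOK (d : PySem.Dict (Int × Int) Int) : Prop := ∀ kv ∈ d.items, 0 ≤ kv.2 ∧ kv.2 < pvMOD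

def pvContrib (r : List Int) (x : Int) (d : PySem.Dict (Int × Int) Int) (k : Int × Int) : Int :=
  if k.1 * x + k.2 > k.2 * x then 0
  else
    d.getD k 0 *
      fpure r (PySem.Int.floordiv (k.1 * x + k.2) (Int.gcd (k.1 * x + k.2) (k.2 * x)))
        (PySem.Int.floordiv (k.2 * x) (Int.gcd (k.1 * x + k.2) (k.2 * x)))

def MemoOK (a : List Int) (m : PySem.Dict (Int × Int × Int) Int) : Prop :=
  ∀ i p q v, m.get? (i, p, q) = some v → v = fpure (a.drop i.toNat) p q

lemma mod_modeq (w : Int) : PySem.Int.mod w pvMOD ≡ w [ZMOD pvMOD] := by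
  rw [PySem.Int.mod_eq_emod_of_pos (by norm_num [pvMOD] : (0:Int) < pvMOD)]
  exact Int.emod_emod_of_dvd w dvd_rfl

lemma mod_congr_of_modeq {a b : Int} (h : a ≡ b [ZMOD pvMOD]) :
    PySem.Int.mod a pvMOD = PySem.Int.mod b pvMOD := by
  rw [PySem.Int.mod_eq_emod_of_pos (by norm_num [pvMOD] : (0:Int) < pvMOD),
    PySem.Int.mod_eq_emod_of_pos (by norm_num [pvMOD] : (0:Int) < pvMOD)]
  exact h

lemma fpure_range (r : List Int) (p q : Int) : 0 ≤ fpure r p q ∧ fpure r p q < pvMOD := by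
  induction r generalizing p q with
  | nil => simp only [fpure]; split <;> norm_num [pvMOD]
  | cons x rest ih =>
    simp only [fpure]
    split
    · exact ⟨PySem.Int.mod_nonneg _ (by norm_num [pvMOD]),
        PySem.Int.mod_lt _ (by norm_num [pvMOD])⟩
    · exact ih p q

lemma modeq_sum_map {α : Type} (l : List α) (f g : α → Int)
    (h : ∀ y ∈ l, f y ≡ g y [ZMOD pvMOD]) : (l.map f).sum ≡ (l.map g).sum [ZMOD pvMOD] := by
  induction l with
  | nil => rfl
  | cons y t ih =>
    simp only [List.map_cons, List.sum_cons]
    exact (h y (List.mem_cons_self)).add (ih fun z hz => h z (List.mem_cons_of_mem _ hz))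

lemma sum_map_replace (r : List Int) (key : Int × Int) (v : Int) :
    ∀ (l : List ((Int × Int) × Int)), (l.map (fun p => p.1)).Nodup →
      ∀ w, l.find? (fun p => p.1 == key) = some w →
      pvSum r (l.map (fun p => if (p.1 == key) = true then (key, v) else p))
        = pvSum r l - w.2 * fpure r key.1 key.2 + v * fpure r key.1 key.2 := by
  intro l
  induction l with
  | nil => intro _ w hw; simp at hw
  | cons hd t ih =>
    intro hnd w hw
    simp only [List.map_cons, List.nodup_cons, List.mem_map] at hnd
    by_cases hb : (hd.1 == key) = true
    · have hk : hd.1 = key := by simpa using hb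
      rw [List.find?_cons_of_pos (p := fun p => p.1 == key) (a := hd) (l := t) hb] at hw
      injection hw with hw; subst hw
      have ht : t.map (fun p => if (p.1 == key) = true then (key, v) else p) = t := by
        apply List.map_congr_left ?_ |>.trans (List.map_id t)
        intro p hp
        have : p.1 ≠ key := by
          intro h; exact hnd.1 ⟨p, hp, h.trans hk.symm⟩
        simp [this]
      simp only [List.map_cons, ht, if_pos hb, pvSum, List.sum_cons]
      rw [← hk]
      ring
    · rw [List.find?_cons_of_neg (p := fun p => p.1 == key) (a := hd) (l := t) hb] at hw
      have := ih hnd.2 w hw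
      simp only [List.map_cons, if_neg hb, pvSum, List.sum_cons] at this ⊢
      rw [this]; ring

lemma pvSum_insert (r : List Int) (d : PySem.Dict (Int × Int) Int) (key : Int × Int) (v : Int)
    (hnd : d.keys.Nodup) :
    Tsum r (d.insert key v)
      = Tsum r d - d.getD key 0 * fpure r key.1 key.2 + v * fpure r key.1 key.2 := by
  by_cases hc : d.contains key = true
  · have hs : (d.get? key).isSome := by rw [← PySem.Dict.contains_eq_isSome_get?, hc]
    obtain ⟨w, hw⟩ := Option.isSome_iff_exists.mp hs
    have hfind : d.items.find? (fun p => p.1 == key) = some ⟨key, w⟩ := by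
      simp only [PySem.Dict.get?] at hw
      obtain ⟨p, hp, hp2⟩ := Option.map_eq_some_iff.mp hw
      have : p.1 = key := by
        have := List.find?_some hp
        simpa using this
      cases p; simp_all
    rw [PySem.Dict.getD_of_get?_eq_some d 0 hw]
    rw [Tsum, PySem.Dict.items_insert_of_contains d v hc]
    exact sum_map_replace r key v d.items hnd ⟨key, w⟩ hfind
  · have hc' : d.contains key = false := by simpa using hc
    rw [Tsum, PySem.Dict.items_insert_of_not_contains d v hc',
      PySem.Dict.getD_of_not_contains d 0 hc']
    simp only [pvSum, List.map_append, List.sum_append, List.map_cons, List.map_nil,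
      List.sum_cons, List.sum_nil, Tsum]
    ring

lemma stepBody_tsum (r : List Int) (x : Int) (d nd : PySem.Dict (Int × Int) Int) (k : Int × Int)
    (hnd : nd.keys.Nodup) :
    (stepBody d x nd k).keys.Nodup ∧
      Tsum r (stepBody d x nd k) ≡ Tsum r nd + pvContrib r x d k [ZMOD pvMOD] := by
  simp only [stepBody, pvContrib]
  by_cases h : k.1 * x + k.2 > k.2 * x
  · rw [if_pos h, if_pos h]
    exact ⟨hnd, by simp⟩
  · rw [if_neg h, if_neg h]
    simp only [PySem.Dict.modify]
    set K : Int × Int := (PySem.Int.floordiv (k.1 * x + k.2) (Int.gcd (k.1 * x + k.2) (k.2 * x)),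
      PySem.Int.floordiv (k.2 * x) (Int.gcd (k.1 * x + k.2) (k.2 * x))) with hK
    set old := nd.getD K 0 with hold
    set dv := d.getD (k.1, k.2) 0 with hdv
    have hnd1 : (nd.insert K (old + dv)).keys.Nodup := PySem.Dict.nodup_keys_insert _ _ _ hnd
    refine ⟨PySem.Dict.nodup_keys_insert _ _ _ hnd1, ?_⟩
    have e1 := pvSum_insert r nd K (old + dv) hnd
    have e2 := pvSum_insert r (nd.insert K (old + dv)) K
      (PySem.Int.mod ((nd.insert K (old + dv)).getD K 0) pvMOD) hnd1
    rw [PySem.Dict.getD_insert_self] at e2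
    rw [PySem.Dict.getD_insert_self, e2, e1, ← hold]
    have hK1 : PySem.Int.floordiv (k.1 * x + k.2) (Int.gcd (k.1 * x + k.2) (k.2 * x)) = K.1 := rfl
    have hK2 : PySem.Int.floordiv (k.2 * x) (Int.gcd (k.1 * x + k.2) (k.2 * x)) = K.2 := rfl
    rw [hK1, hK2]
    have hfix : d.getD k 0 = dv := by rw [hdv]
    rw [show dv = d.getD k 0 from hfix.symm]
    have hmm : PySem.Int.mod (old + dv) pvMOD * fpure r K.1 K.2
        ≡ (old + dv) * fpure r K.1 K.2 [ZMOD pvMOD] := (mod_modeq _).mul_right _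
    have : Tsum r nd - old * fpure r K.1 K.2 + (old + dv) * fpure r K.1 K.2 -
          (old + dv) * fpure r K.1 K.2 +
          PySem.Int.mod (old + dv) pvMOD * fpure r K.1 K.2
        ≡ Tsum r nd - old * fpure r K.1 K.2 + (old + dv) * fpure r K.1 K.2 -
          (old + dv) * fpure r K.1 K.2 + (old + dv) * fpure r K.1 K.2 [ZMOD pvMOD] :=
      Int.ModEq.add_left _ hmm
    refine this.trans ?_
    have : Tsum r nd - old * fpure r K.1 K.2 + (old + dv) * fpure r K.1 K.2 -
          (old + dv) * fpure r K.1 K.2 + (old + dv) * fpure r K.1 K.2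
        = Tsum r nd + d.getD k 0 * fpure r K.1 K.2 := by rw [hfix]; ring
    rw [this]

lemma fold_step (r : List Int) (x : Int) (d : PySem.Dict (Int × Int) Int)
    (ks : List (Int × Int)) :
    ∀ nd : PySem.Dict (Int × Int) Int, nd.keys.Nodup →
      (ks.foldl (stepBody d x) nd).keys.Nodup ∧
        Tsum r (ks.foldl (stepBody d x) nd)
          ≡ Tsum r nd + (ks.map (pvContrib r x d)).sum [ZMOD pvMOD] := by
  induction ks with
  | nil => intro nd h; exact ⟨h, by simp⟩
  | cons k t ih =>
    intro nd h
    obtain ⟨h1, h2⟩ := stepBody_tsum r x d nd k h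
    obtain ⟨h3, h4⟩ := ih (stepBody d x nd k) h1
    refine ⟨h3, ?_⟩
    simp only [List.foldl_cons, List.map_cons, List.sum_cons]
    refine h4.trans ?_
    have := h2.add_right ((t.map (pvContrib r x d)).sum)
    refine this.trans ?_
    have : Tsum r nd + pvContrib r x d k + (t.map (pvContrib r x d)).sum
        = Tsum r nd + (pvContrib r x d k + (t.map (pvContrib r x d)).sum) := by ring
    rw [this]

lemma pointwise (r : List Int) (x : Int) (d : PySem.Dict (Int × Int) Int) (k : Int × Int) :
    d.getD k 0 * fpure (x :: r) k.1 k.2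
      ≡ d.getD k 0 * fpure r k.1 k.2 + pvContrib r x d k [ZMOD pvMOD] := by
  simp only [fpure, pvContrib]
  by_cases h : k.1 * x + k.2 > k.2 * x
  · rw [if_neg (not_le.mpr h), if_pos h, add_zero]
  · rw [if_pos (not_lt.mp h), if_neg h]
    refine ((mod_modeq _).mul_left _).trans ?_
    rw [mul_add]

lemma tsum_cons (r : List Int) (x : Int) (d : PySem.Dict (Int × Int) Int) (hnd : d.keys.Nodup) :
    Tsum (x :: r) d ≡ Tsum r d + (d.keys.map (pvContrib r x d)).sum [ZMOD pvMOD] := by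
  have hitems := PySem.Dict.items_eq_map_keys d hnd (0 : Int)
  rw [Tsum, Tsum, pvSum, pvSum, hitems, List.map_map, List.map_map]
  have e : ((fun kv : (Int × Int) × Int => kv.2 * fpure r kv.1.1 kv.1.2) ∘
      (fun k => (k, d.getD k 0))) = fun k : Int × Int => d.getD k 0 * fpure r k.1 k.2 := rfl
  have e2 : ((fun kv : (Int × Int) × Int => kv.2 * fpure (x :: r) kv.1.1 kv.1.2) ∘
      (fun k => (k, d.getD k 0))) = fun k : Int × Int => d.getD k 0 * fpure (x :: r) k.1 k.2 := rfl
  rw [e, e2]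
  have : (d.keys.map (fun k : Int × Int => d.getD k 0 * fpure r k.1 k.2)).sum
        + (d.keys.map (pvContrib r x d)).sum
      = (d.keys.map (fun k : Int × Int =>
          d.getD k 0 * fpure r k.1 k.2 + pvContrib r x d k)).sum := by
    rw [PySem.List.sum_map_add_int]
  rw [this]
  exact modeq_sum_map _ _ _ (fun k _ => pointwise r x d k)

lemma valsOK_stepBody (d : PySem.Dict (Int × Int) Int) (x : Int)
    (nd : PySem.Dict (Int × Int) Int) (k : Int × Int) (h : ValsOK nd) :
    ValsOK (stepBody d x nd k) := by
  simp only [stepBody]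
  split
  · exact h
  · simp only [PySem.Dict.modify]
    intro kv hkv
    rw [PySem.Dict.mem_items_insert] at hkv
    rcases hkv with hkv | ⟨hkv, hne⟩
    · subst hkv
      exact ⟨PySem.Int.mod_nonneg _ (by norm_num [pvMOD]),
        PySem.Int.mod_lt _ (by norm_num [pvMOD])⟩
    · rw [PySem.Dict.mem_items_insert] at hkv
      rcases hkv with hkv | ⟨hkv, _⟩
      · exact absurd (by rw [hkv]) hne
      · exact h kv hkv

lemma valsOK_fold (d : PySem.Dict (Int × Int) Int) (x : Int) (ks : List (Int × Int)) :
    ∀ nd : PySem.Dict (Int × Int) Int, ValsOK nd → ValsOK (ks.foldl (stepBody d x) nd) := by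
  induction ks with
  | nil => exact fun nd h => h
  | cons k t ih => exact fun nd h => ih _ (valsOK_stepBody d x nd k h)

lemma sum_nil_list :
    ∀ (l : List ((Int × Int) × Int)), (l.map (fun p => p.1)).Nodup →
      (l.map (fun kv => kv.2 * fpure [] kv.1.1 kv.1.2)).sum
        = ((l.find? (fun p => p.1 == ((1:Int), (1:Int)))).map (fun p => p.2)).getD 0 := by
  intro l
  induction l with
  | nil => simp
  | cons hd t ih =>
    intro hnd
    simp only [List.map_cons, List.nodup_cons, List.mem_map] at hnd
    by_cases hb : (hd.1 == ((1:Int), (1:Int))) = true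
    · have hk : hd.1 = ((1:Int), (1:Int)) := by simpa using hb
      rw [List.find?_cons_of_pos (p := fun p => p.1 == ((1:Int),(1:Int))) (a := hd) (l := t) hb]
      have htail : (t.map (fun kv => kv.2 * fpure [] kv.1.1 kv.1.2)).sum = 0 := by
        apply List.sum_eq_zero
        intro y hy
        obtain ⟨kv, hkv, rfl⟩ := List.mem_map.mp hy
        have hne : kv.1 ≠ ((1:Int), (1:Int)) := by
          intro h; exact hnd.1 ⟨kv, hkv, h.trans hk.symm⟩
        have hn : ¬(kv.1.1 = 1 ∧ kv.1.2 = 1) := fun ⟨h1, h2⟩ => hne (Prod.ext h1 h2)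
        have : fpure [] kv.1.1 kv.1.2 = 0 := by simp [fpure, hn]
        rw [this, mul_zero]
      simp only [List.map_cons, List.sum_cons, htail, add_zero]
      have : fpure [] hd.1.1 hd.1.2 = 1 := by
        rw [hk]; simp [fpure]
      rw [this, mul_one]
      simp
    · rw [List.find?_cons_of_neg (p := fun p => p.1 == ((1:Int),(1:Int))) (a := hd) (l := t) hb]
      have hn : ¬(hd.1.1 = 1 ∧ hd.1.2 = 1) := fun ⟨h1, h2⟩ => hb (by simp [Prod.ext_iff, h1, h2])
      have hz : fpure [] hd.1.1 hd.1.2 = 0 := by simp [fpure, hn]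
      simp only [List.map_cons, List.sum_cons, hz, mul_zero, zero_add]
      exact ih hnd.2

lemma tsum_nil (d : PySem.Dict (Int × Int) Int) (hnd : d.keys.Nodup) :
    Tsum [] d = d.getD (1, 1) 0 := by
  rw [Tsum, pvSum, sum_nil_list d.items hnd]
  rfl

lemma getD_range (d : PySem.Dict (Int × Int) Int) (hval : ValsOK d) :
    0 ≤ d.getD (1, 1) 0 ∧ d.getD (1, 1) 0 < pvMOD := by
  cases hg : d.get? (1, 1) with
  | none => rw [PySem.Dict.getD_eq_get?_getD, hg]; norm_num [pvMOD]
  | some w =>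
    rw [PySem.Dict.getD_of_get?_eq_some d 0 hg]
    exact hval (⟨(1, 1), w⟩ : (Int × Int) × Int) (PySem.Dict.mem_items_of_get?_eq_some d hg)

lemma main_lemma (r : List Int) :
    ∀ d : PySem.Dict (Int × Int) Int, d.keys.Nodup → ValsOK d →
      (r.foldl solveStep d).getD (1, 1) 0 = PySem.Int.mod (Tsum r d) pvMOD := by
  induction r with
  | nil =>
    intro d hnd hval
    rw [List.foldl_nil, tsum_nil d hnd]
    obtain ⟨h0, h1⟩ := getD_range d hval
    rw [PySem.Int.mod_eq_emod_of_pos (by norm_num [pvMOD] : (0:Int) < pvMOD),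
      Int.emod_eq_of_lt h0 h1]
  | cons x r ih =>
    intro d hnd hval
    rw [List.foldl_cons]
    obtain ⟨hnd', hcong⟩ := fold_step r x d d.keys d hnd
    have hnd'' : (solveStep d x).keys.Nodup := hnd'
    have hval'' : ValsOK (solveStep d x) := valsOK_fold d x d.keys d hval
    rw [ih (solveStep d x) hnd'' hval'']
    have h2 : Tsum r (solveStep d x) ≡ Tsum (x :: r) d [ZMOD pvMOD] :=
      hcong.trans (tsum_cons r x d hnd).symm
    exact mod_congr_of_modeq h2

lemma memoOK_insert (a : List Int) (m : PySem.Dict (Int × Int × Int) Int)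
    (hm : MemoOK a m) (i p q : Int) (res : Int) (hres : res = fpure (a.drop i.toNat) p q) :
    MemoOK a (m.insert (i, p, q) res) := by
  intro j p' q' v hv
  rw [PySem.Dict.get?_insert] at hv
  split at hv
  · rename_i he
    injection hv with hv
    obtain ⟨h1, h2, h3⟩ : j = i ∧ p' = p ∧ q' = q := by
      simpa [Prod.ext_iff] using he
    subst h1; subst h2; subst h3; subst hv
    exact hres
  · exact hm j p' q' v hv

lemma fm_correct (a : List Int) (l : List Int) :
    ∀ (i p q : Int) (m : PySem.Dict (Int × Int × Int) Int),
      0 ≤ i → a.drop i.toNat = l → MemoOK a m →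
      (solveAltMemo l i p q m).1 = fpure l p q ∧ MemoOK a (solveAltMemo l i p q m).2 := by
  induction l with
  | nil =>
    intro i p q m _ _ hm
    exact ⟨rfl, hm⟩
  | cons x rest ih =>
    intro i p q m hi hdrop hm
    have hdrop' : a.drop (i + 1).toNat = rest := by
      have : (i + 1).toNat = i.toNat + 1 := by omega
      rw [this, ← List.tail_drop, hdrop]
      rfl
    cases hg : m.get? (i, p, q) with
    | some v =>
      have h1 : (solveAltMemo (x :: rest) i p q m) = (v, m) := by
        simp only [solveAltMemo, hg]
      rw [h1]
      refine ⟨?_, hm⟩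
      have := hm i p q v hg
      rw [hdrop] at this
      exact this
    | none =>
      obtain ⟨ih1, ihm1⟩ := ih (i + 1) p q m (by omega) hdrop' hm
      by_cases hle : p * x + q ≤ q * x
      · set g : Int := (Int.gcd (p * x + q) (q * x) : Int) with hgdef
        obtain ⟨ih2, ihm2⟩ := ih (i + 1) (PySem.Int.floordiv (p * x + q) g)
          (PySem.Int.floordiv (q * x) g) (solveAltMemo rest (i + 1) p q m).2 (by omega) hdrop' ihm1
        have hstep : solveAltMemo (x :: rest) i p q m =
            (PySem.Int.mod ((solveAltMemo rest (i + 1) p q m).1 +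
              (solveAltMemo rest (i + 1) (PySem.Int.floordiv (p * x + q) g)
                (PySem.Int.floordiv (q * x) g) (solveAltMemo rest (i + 1) p q m).2).1) pvMOD,
             (solveAltMemo rest (i + 1) (PySem.Int.floordiv (p * x + q) g)
                (PySem.Int.floordiv (q * x) g) (solveAltMemo rest (i + 1) p q m).2).2.insert (i, p, q)
              (PySem.Int.mod ((solveAltMemo rest (i + 1) p q m).1 +
                (solveAltMemo rest (i + 1) (PySem.Int.floordiv (p * x + q) g)
                  (PySem.Int.floordiv (q * x) g) (solveAltMemo rest (i + 1) p q m).2).1) pvMOD)) := by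
          simp only [solveAltMemo, hg, ← hgdef, if_pos hle]
        have hval : PySem.Int.mod ((solveAltMemo rest (i + 1) p q m).1 +
            (solveAltMemo rest (i + 1) (PySem.Int.floordiv (p * x + q) g)
              (PySem.Int.floordiv (q * x) g) (solveAltMemo rest (i + 1) p q m).2).1) pvMOD
            = fpure (x :: rest) p q := by
          rw [ih1, ih2]
          simp only [fpure, ← hgdef, if_pos hle]
        rw [hstep]
        refine ⟨hval, ?_⟩
        apply memoOK_insert a _ ihm2 i p q _ ?_
        rw [hdrop]
        exact hval
      · have hstep : solveAltMemo (x :: rest) i p q m =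
            ((solveAltMemo rest (i + 1) p q m).1,
             (solveAltMemo rest (i + 1) p q m).2.insert (i, p, q)
               (solveAltMemo rest (i + 1) p q m).1) := by
          simp only [solveAltMemo, hg, if_neg hle]
        have hval : (solveAltMemo rest (i + 1) p q m).1 = fpure (x :: rest) p q := by
          rw [ih1]
          simp only [fpure, if_neg hle]
        rw [hstep]
        refine ⟨hval, ?_⟩
        apply memoOK_insert a _ ihm1 i p q _ ?_
        rw [hdrop]
        exact hval

lemma alt_eq_fpure (n : Int) (a : List Int) : solve_alt n a = fpure a 0 1 := by
  have hm : MemoOK a PySem.Dict.empty := by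
    intro i p q v hv
    rw [PySem.Dict.get?_empty] at hv
    cases hv
  exact (fm_correct a a 0 0 1 PySem.Dict.empty le_rfl (by simp) hm).1

lemma dp0_items : ((PySem.Dict.empty).insert ((0 : Int), (1 : Int)) (1 : Int)).items
    = [(((0 : Int), (1 : Int)), (1 : Int))] := by
  decide

lemma solve_eq_fpure (n : Int) (a : List Int) : solve n a = fpure a 0 1 := by
  have hnd : ((PySem.Dict.empty).insert ((0 : Int), (1 : Int)) (1 : Int)).keys.Nodup := by
    decide
  have hval : ValsOK ((PySem.Dict.empty).insert ((0 : Int), (1 : Int)) 1) := by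
    intro kv hkv
    rw [dp0_items] at hkv
    simp at hkv
    subst hkv
    norm_num [pvMOD]
  rw [solve, main_lemma a _ hnd hval]
  have ht : Tsum a ((PySem.Dict.empty).insert ((0 : Int), (1 : Int)) 1) = fpure a 0 1 := by
    rw [Tsum, pvSum, dp0_items]
    simp
  rw [ht]
  obtain ⟨h0, h1⟩ := fpure_range a 0 1
  rw [PySem.Int.mod_eq_emod_of_pos (by norm_num [pvMOD] : (0:Int) < pvMOD),
    Int.emod_eq_of_lt h0 h1]

-- ===== VERDICT (by name: the statement is the Claim_ definition above) =====
theorem solve_spec : Claim_equal_solve := by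
  intro n a _
  unfold Spec_solve
  rw [solve_eq_fpure, alt_eq_fpure]
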